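-- pv_equiv track=rewrite | github.com/sijanec/Zabja-igra | level-v-zabji-igri.py | lovska_poteza
-- ===== SOURCE A (Python) =====
-- def lovska_poteza(polje, frog_position):
--     mozno = []
--
--     for i in [1, -1]:
--         for j in [1, -1]:
--             x = 1
--             while True:
--                 if [frog_position[0] + x * i, frog_position[1] + x * j] in polje:
--                     mozno.append([frog_position[0] + x * i, frog_position[1] + x * j])
--                     x += 1
--                 else:
--                     break
--     return mozno
-- ===== SOURCE B (Python) =====
-- def lovska_poteza(polje, frog_position):
--     f0, f1 = frog_position[0], frog_position[1]
--     # one classifying pass: bucket each diagonal cell's distance by quadrant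
--     pp, pm, mp, mm = set(), set(), set(), set()
--     for p in polje:
--         if len(p) == 2:
--             dx, dy = p[0] - f0, p[1] - f1
--             if dx != 0 and abs(dx) == abs(dy):
--                 d = abs(dx)
--                 if dx > 0:
--                     (pp if dy > 0 else pm).add(d)
--                 else:
--                     (mp if dy > 0 else mm).add(d)
--     out = []
--     for (i, j), s in (((1, 1), pp), ((1, -1), pm), ((-1, 1), mp), ((-1, -1), mm)):
--         # longest contiguous prefix 1..k of the sorted distances
--         k = 0
--         for t, v in enumerate(sorted(s), start=1):
--             if v != t:
--                 break
--             k = t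
--         out.extend([f0 + x * i, f1 + x * j] for x in range(1, k + 1))
--     return out
-- ===== Notes on version B (the rewrite author's own statement) =====
-- stated objective: alternative
-- what changed: A walks each diagonal outward, rescanning polje for membership at every step; B makes one classifying pass over polje bucketing each cell's diagonal distance by quadrant, then sorts each bucket and scans it for the longest contiguous prefix 1..k, emitting the cells with a range comprehension.
import Mathlib
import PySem

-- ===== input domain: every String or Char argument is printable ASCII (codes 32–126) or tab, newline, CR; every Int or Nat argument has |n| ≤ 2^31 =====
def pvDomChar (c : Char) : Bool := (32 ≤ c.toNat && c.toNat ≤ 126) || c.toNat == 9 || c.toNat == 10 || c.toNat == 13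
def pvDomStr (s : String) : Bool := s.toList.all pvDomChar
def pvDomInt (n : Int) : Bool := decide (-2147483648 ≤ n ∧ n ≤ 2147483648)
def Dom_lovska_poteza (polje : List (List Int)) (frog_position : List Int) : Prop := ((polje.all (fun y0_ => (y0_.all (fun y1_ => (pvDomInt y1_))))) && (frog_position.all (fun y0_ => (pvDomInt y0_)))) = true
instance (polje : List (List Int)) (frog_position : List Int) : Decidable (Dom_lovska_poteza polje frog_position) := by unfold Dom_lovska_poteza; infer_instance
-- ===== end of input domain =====

-- B replaces A's outward membership walk by a single classifying pass that buckets each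
-- cell's diagonal distance by quadrant, a sort of each bucket, a scan for the longest
-- contiguous prefix 1..k, and a range comprehension emitting the cells; objective: alternative.

-- ===== PORT A =====
-- the `while True` walk of A for one direction (i, j), starting at x; the walk visits
-- pairwise distinct cells of polje, so `polje.length + 1` steps of fuel always suffice
-- (a pure totality guard: the break is always reached within the fuel)
def lpWalkA (polje : List (List Int)) (f0 f1 i j : Int) : Nat → Int → List (List Int)
  | 0, _ => []
  | fuel + 1, x =>
    if [f0 + x * i, f1 + x * j] ∈ polje then
      [f0 + x * i, f1 + x * j] :: lpWalkA polje f0 f1 i j fuel (x + 1)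
    else []

def lovska_poteza (polje : List (List Int)) (frog_position : List Int) : List (List Int) :=
  [(1 : Int), -1].foldl (fun mozno i =>
    [(1 : Int), -1].foldl (fun mozno j =>
      mozno ++ lpWalkA polje (PySem.List.pyGetD frog_position 0 0)
        (PySem.List.pyGetD frog_position 1 0) i j (polje.length + 1) 1) mozno) []

-- ===== PORT B =====
-- the classifying pass: four distance sets (pp, pm, mp, mm), one per quadrant
def lpStep (f0 f1 : Int)
    (s : PySem.Set Int × PySem.Set Int × PySem.Set Int × PySem.Set Int) (p : List Int) :
    PySem.Set Int × PySem.Set Int × PySem.Set Int × PySem.Set Int :=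
  match p with
  | [a, b] =>
    if a - f0 ≠ 0 ∧ |a - f0| = |b - f1| then
      if a - f0 > 0 then
        (if b - f1 > 0 then (PySem.Set.add s.1 |a - f0|, s.2.1, s.2.2.1, s.2.2.2)
         else (s.1, PySem.Set.add s.2.1 |a - f0|, s.2.2.1, s.2.2.2))
      else
        (if b - f1 > 0 then (s.1, s.2.1, PySem.Set.add s.2.2.1 |a - f0|, s.2.2.2)
         else (s.1, s.2.1, s.2.2.1, PySem.Set.add s.2.2.2 |a - f0|))
    else s
  | _ => s

def lpBuckets (polje : List (List Int)) (f0 f1 : Int) :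
    PySem.Set Int × PySem.Set Int × PySem.Set Int × PySem.Set Int :=
  polje.foldl (lpStep f0 f1)
    (PySem.Set.empty, PySem.Set.empty, PySem.Set.empty, PySem.Set.empty)

-- `for t, v in enumerate(sorted(s), 1): if v != t: break; k = t` — prefix scan with break
def lpPrefLen : List Int → Int → Int
  | [], k => k
  | v :: rest, k => if v = k + 1 then lpPrefLen rest (k + 1) else k

def lovska_poteza_alt (polje : List (List Int)) (frog_position : List Int) : List (List Int) :=
  let f0 := PySem.List.pyGetD frog_position 0 0
  let f1 := PySem.List.pyGetD frog_position 1 0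
  let bs := lpBuckets polje f0 f1
  [((1 : Int), (1 : Int), bs.1), (1, -1, bs.2.1), (-1, 1, bs.2.2.1), (-1, -1, bs.2.2.2)].foldl
    (fun out t =>
      let k := lpPrefLen (PySem.List.sorted t.2.2 (fun x => x) false) 0
      out ++ (PySem.List.pyRange 1 (k + 1) 1).map (fun x => [f0 + x * t.1, f1 + x * t.2.1])) []

-- ===== PRECONDITION & SPEC =====
-- A indexes frog_position[0] and frog_position[1]: it raises IndexError when the list is
-- shorter than 2; exactly those inputs are excluded.
def Pre_lovska_poteza (polje : List (List Int)) (frog_position : List Int) : Prop :=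
  2 ≤ frog_position.length
instance (polje : List (List Int)) (frog_position : List Int) : Decidable (Pre_lovska_poteza polje frog_position) := by unfold Pre_lovska_poteza; infer_instance

def pvWitness_lovska_poteza : List (List Int) × List Int := ([[1, 1], [2, 2], [0, 3]], [0, 0])

def Spec_lovska_poteza (polje : List (List Int)) (frog_position : List Int) (out : List (List Int)) : Prop := out = lovska_poteza_alt polje frog_position
instance (polje : List (List Int)) (frog_position : List Int) (out : List (List Int)) : Decidable (Spec_lovska_poteza polje frog_position out) := by unfold Spec_lovska_poteza; infer_instance

-- ===== CLAIM (what is proved, stated in full; the proofs are below) =====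
def Claim_equal_lovska_poteza : Prop := ∀ (polje : List (List Int)) (frog_position : List Int), Dom_lovska_poteza polje frog_position → Pre_lovska_poteza polje frog_position → Spec_lovska_poteza polje frog_position (lovska_poteza polje frog_position)

-- ===== LEMMAS AND PROOFS =====

-- membership in the four components after one classification step
lemma lpStep_mem (f0 f1 a b x : Int)
    (s : PySem.Set Int × PySem.Set Int × PySem.Set Int × PySem.Set Int) :
    (x ∈ (lpStep f0 f1 s [a, b]).1 ↔ x ∈ s.1 ∨ (0 < x ∧ a = f0 + x ∧ b = f1 + x)) ∧
    (x ∈ (lpStep f0 f1 s [a, b]).2.1 ↔ x ∈ s.2.1 ∨ (0 < x ∧ a = f0 + x ∧ b = f1 - x)) ∧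
    (x ∈ (lpStep f0 f1 s [a, b]).2.2.1 ↔ x ∈ s.2.2.1 ∨ (0 < x ∧ a = f0 - x ∧ b = f1 + x)) ∧
    (x ∈ (lpStep f0 f1 s [a, b]).2.2.2 ↔ x ∈ s.2.2.2 ∨ (0 < x ∧ a = f0 - x ∧ b = f1 - x)) := by
  simp only [lpStep]
  split_ifs with h1 h2 h3 h4 <;>
    (try dsimp only) <;>
    (try simp only [PySem.Set.mem_add]) <;>
    simp only [Int.abs_eq_natAbs] at * <;>
    refine ⟨?_, ?_, ?_, ?_⟩ <;>
    constructor <;>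
    intro h <;>
    (try rcases h with h | h) <;>
    first
      | exact Or.inl h
      | exact h
      | exact Or.inr (by omega)
      | exact absurd h (by omega)

-- membership characterisation of the four buckets after the fold
lemma mem_lpFold (polje : List (List Int)) (f0 f1 : Int) :
    ∀ (s : PySem.Set Int × PySem.Set Int × PySem.Set Int × PySem.Set Int) (x : Int),
      (x ∈ (polje.foldl (lpStep f0 f1) s).1 ↔ x ∈ s.1 ∨ (0 < x ∧ [f0 + x, f1 + x] ∈ polje)) ∧
      (x ∈ (polje.foldl (lpStep f0 f1) s).2.1 ↔ x ∈ s.2.1 ∨ (0 < x ∧ [f0 + x, f1 - x] ∈ polje)) ∧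
      (x ∈ (polje.foldl (lpStep f0 f1) s).2.2.1 ↔ x ∈ s.2.2.1 ∨ (0 < x ∧ [f0 - x, f1 + x] ∈ polje)) ∧
      (x ∈ (polje.foldl (lpStep f0 f1) s).2.2.2 ↔ x ∈ s.2.2.2 ∨ (0 < x ∧ [f0 - x, f1 - x] ∈ polje)) := by
  induction polje with
  | nil => intro s x; simp
  | cons p rest ih =>
    intro s x
    simp only [List.foldl_cons]
    match p with
    | [] =>
      rw [show lpStep f0 f1 s [] = s from rfl]
      obtain ⟨e1, e2, e3, e4⟩ := ih s x
      rw [e1, e2, e3, e4]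
      refine ⟨?_, ?_, ?_, ?_⟩ <;> simp
    | [a] =>
      rw [show lpStep f0 f1 s [a] = s from rfl]
      obtain ⟨e1, e2, e3, e4⟩ := ih s x
      rw [e1, e2, e3, e4]
      refine ⟨?_, ?_, ?_, ?_⟩ <;> simp
    | a :: b :: c :: t =>
      rw [show lpStep f0 f1 s (a :: b :: c :: t) = s from rfl]
      obtain ⟨e1, e2, e3, e4⟩ := ih s x
      rw [e1, e2, e3, e4]
      refine ⟨?_, ?_, ?_, ?_⟩ <;> simp
    | [a, b] =>
      obtain ⟨e1, e2, e3, e4⟩ := ih (lpStep f0 f1 s [a, b]) x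
      obtain ⟨k1, k2, k3, k4⟩ := lpStep_mem f0 f1 a b x s
      rw [e1, k1, e2, k2, e3, k3, e4, k4]
      simp only [List.mem_cons]
      refine ⟨?_, ?_, ?_, ?_⟩ <;>
      · constructor
        · rintro ((h | ⟨hx, ha, hb⟩) | ⟨hx, h⟩)
          · exact Or.inl h
          · exact Or.inr ⟨hx, Or.inl (by simp [ha, hb])⟩
          · exact Or.inr ⟨hx, Or.inr h⟩
        · rintro (h | ⟨hx, heq | h⟩)
          · exact Or.inl (Or.inl h)
          · refine Or.inl (Or.inr ⟨hx, ?_, ?_⟩) <;>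
              (injection heq with u v; injection v with w _) <;> omega
          · exact Or.inr ⟨hx, h⟩

-- one classification step keeps the buckets Nodup and grows each by at most one element
lemma lpStep_nodup_len (f0 f1 : Int)
    (s : PySem.Set Int × PySem.Set Int × PySem.Set Int × PySem.Set Int) (p : List Int)
    (h1 : s.1.Nodup) (h2 : s.2.1.Nodup) (h3 : s.2.2.1.Nodup) (h4 : s.2.2.2.Nodup) :
    ((lpStep f0 f1 s p).1.Nodup ∧ (lpStep f0 f1 s p).2.1.Nodup ∧
     (lpStep f0 f1 s p).2.2.1.Nodup ∧ (lpStep f0 f1 s p).2.2.2.Nodup) ∧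
    (lpStep f0 f1 s p).1.length ≤ s.1.length + 1 ∧
    (lpStep f0 f1 s p).2.1.length ≤ s.2.1.length + 1 ∧
    (lpStep f0 f1 s p).2.2.1.length ≤ s.2.2.1.length + 1 ∧
    (lpStep f0 f1 s p).2.2.2.length ≤ s.2.2.2.length + 1 := by
  have hadd : ∀ (t : PySem.Set Int) (y : Int), t.Nodup →
      (PySem.Set.add t y).Nodup ∧ (PySem.Set.add t y).length ≤ t.length + 1 := by
    intro t y ht
    refine ⟨PySem.Set.nodup_add _ _ ht, ?_⟩
    rw [PySem.Set.add_eq_ite]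
    split_ifs <;> simp
  match p with
  | [] => exact ⟨⟨h1, h2, h3, h4⟩, Nat.le_succ _, Nat.le_succ _, Nat.le_succ _, Nat.le_succ _⟩
  | [a] => exact ⟨⟨h1, h2, h3, h4⟩, Nat.le_succ _, Nat.le_succ _, Nat.le_succ _, Nat.le_succ _⟩
  | a :: b :: c :: t =>
    exact ⟨⟨h1, h2, h3, h4⟩, Nat.le_succ _, Nat.le_succ _, Nat.le_succ _, Nat.le_succ _⟩
  | [a, b] =>
    simp only [lpStep]
    split_ifs <;> (try dsimp only) <;>
      refine ⟨⟨?_, ?_, ?_, ?_⟩, ?_, ?_, ?_, ?_⟩ <;>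
      first
        | assumption
        | exact (hadd _ _ (by assumption)).1
        | exact Nat.le_succ _
        | exact (hadd _ _ (by assumption)).2

-- the buckets stay Nodup and grow by at most one element per point of polje
lemma lpFold_nodup_len (polje : List (List Int)) (f0 f1 : Int) :
    ∀ (s : PySem.Set Int × PySem.Set Int × PySem.Set Int × PySem.Set Int),
      s.1.Nodup → s.2.1.Nodup → s.2.2.1.Nodup → s.2.2.2.Nodup →
      ((polje.foldl (lpStep f0 f1) s).1.Nodup ∧
       (polje.foldl (lpStep f0 f1) s).2.1.Nodup ∧
       (polje.foldl (lpStep f0 f1) s).2.2.1.Nodup ∧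
       (polje.foldl (lpStep f0 f1) s).2.2.2.Nodup) ∧
      ((polje.foldl (lpStep f0 f1) s).1.length ≤ s.1.length + polje.length ∧
       (polje.foldl (lpStep f0 f1) s).2.1.length ≤ s.2.1.length + polje.length ∧
       (polje.foldl (lpStep f0 f1) s).2.2.1.length ≤ s.2.2.1.length + polje.length ∧
       (polje.foldl (lpStep f0 f1) s).2.2.2.length ≤ s.2.2.2.length + polje.length) := by
  induction polje with
  | nil =>
    intro s h1 h2 h3 h4
    exact ⟨⟨h1, h2, h3, h4⟩, by simp, by simp, by simp, by simp⟩
  | cons p rest ih =>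
    intro s h1 h2 h3 h4
    obtain ⟨⟨n1, n2, n3, n4⟩, l1, l2, l3, l4⟩ := lpStep_nodup_len f0 f1 s p h1 h2 h3 h4
    obtain ⟨⟨m1, m2, m3, m4⟩, q1, q2, q3, q4⟩ := ih (lpStep f0 f1 s p) n1 n2 n3 n4
    simp only [List.foldl_cons, List.length_cons]
    exact ⟨⟨m1, m2, m3, m4⟩, by omega, by omega, by omega, by omega⟩

-- prefix-scan spec: on a strictly increasing list of elements all > c, lpPrefLen L c
-- returns the end m of the contiguous run c+1, c+2, …, m of L (m+1 ∉ L), with m ≤ c + |L|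
lemma lpPrefLen_spec : ∀ (L : List Int) (c : Int), L.Pairwise (· < ·) → (∀ v ∈ L, c < v) →
    c ≤ lpPrefLen L c ∧
    (∀ x, c < x → x ≤ lpPrefLen L c → x ∈ L) ∧
    (lpPrefLen L c + 1) ∉ L ∧
    lpPrefLen L c ≤ c + L.length := by
  intro L
  induction L with
  | nil => intro c _ _; simp [lpPrefLen]
  | cons v rest ih =>
    intro c hpw hgt
    have hpw' : rest.Pairwise (· < ·) := hpw.tail
    have hv : ∀ w ∈ rest, v < w := fun w hw => (List.pairwise_cons.mp hpw).1 w hw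
    simp only [lpPrefLen]
    by_cases hveq : v = c + 1
    · rw [if_pos hveq]
      have hgt' : ∀ w ∈ rest, c + 1 < w := fun w hw => by have := hv w hw; omega
      obtain ⟨ha, hb, hc, hd⟩ := ih (c + 1) hpw' hgt'
      refine ⟨by omega, ?_, ?_, by simp; omega⟩
      · intro x hx1 hx2
        by_cases hx : x = c + 1
        · simp [hx, ← hveq]
        · exact List.mem_cons_of_mem _ (hb x (by omega) hx2)
      · simp only [List.mem_cons]
        rintro (h | h)
        · omega
        · exact hc h
    · rw [if_neg hveq]
      have hvgt := hgt v (List.mem_cons_self ..)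
      refine ⟨le_refl _, by omega, ?_, by simp; omega⟩
      simp only [List.mem_cons]
      rintro (h | h)
      · omega
      · have := hv _ h; have := hgt _ (List.mem_cons_of_mem _ h); omega

-- A's walk emits exactly the cells at distances x, x+1, …, k when 1..k are occupied and k+1 is not
lemma lpWalkA_eq_range (polje : List (List Int)) (f0 f1 i j k : Int)
    (hk1 : ∀ x : Int, 1 ≤ x → x ≤ k → [f0 + x * i, f1 + x * j] ∈ polje)
    (hk2 : [f0 + (k + 1) * i, f1 + (k + 1) * j] ∉ polje) :
    ∀ (fuel : Nat) (x : Int), 1 ≤ x → x ≤ k + 1 → k + 2 - x ≤ (fuel : Int) →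
      lpWalkA polje f0 f1 i j fuel x =
        (PySem.List.pyRange x (k + 1) 1).map (fun y => [f0 + y * i, f1 + y * j]) := by
  intro fuel
  induction fuel with
  | zero => intro x _ _ hf; simp at hf; omega
  | succ n ih =>
    intro x hx1 hx2 hf
    simp only [lpWalkA]
    by_cases hxk : x ≤ k
    · rw [if_pos (hk1 x hx1 hxk), PySem.List.pyRange_one_cons (by omega), List.map_cons,
        ih (x + 1) (by omega) (by omega) (by push_cast at hf ⊢; omega)]
    · have hxeq : x = k + 1 := by omega
      rw [hxeq, if_neg hk2, PySem.List.pyRange_one_eq_nil (by omega), List.map_nil]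

-- one direction: A's walk equals B's sorted-bucket prefix extraction
lemma lpDir_eq (polje : List (List Int)) (f0 f1 i j : Int) (B : List Int)
    (hmem : ∀ x : Int, x ∈ B ↔ 0 < x ∧ [f0 + x * i, f1 + x * j] ∈ polje)
    (hnd : B.Nodup) (hlen : B.length ≤ polje.length) :
    lpWalkA polje f0 f1 i j (polje.length + 1) 1 =
      (PySem.List.pyRange 1 (lpPrefLen (PySem.List.sorted B (fun x => x) false) 0 + 1) 1).map
        (fun y => [f0 + y * i, f1 + y * j]) := by
  set L := PySem.List.sorted B (fun x => x) false with hL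
  have hperm : L.Perm B := PySem.List.sorted_perm ..
  have hLmem : ∀ x, x ∈ L ↔ x ∈ B := fun x => hperm.mem_iff
  have hLnd : L.Nodup := hperm.symm.nodup hnd
  have hLle : L.Pairwise (fun a b => (fun x => x) a ≤ (fun x => x) b) :=
    PySem.List.sorted_pairwise ..
  have hLlt : L.Pairwise (· < ·) :=
    (hLle.and hLnd).imp (fun h => lt_of_le_of_ne h.1 h.2)
  have hLpos : ∀ v ∈ L, (0 : Int) < v := fun v hv => ((hmem v).mp ((hLmem v).mp hv)).1
  obtain ⟨ha, hb, hc, hd⟩ := lpPrefLen_spec L 0 hLlt hLpos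
  set k := lpPrefLen L 0 with hk
  have hlenL : L.length = B.length := hperm.length_eq
  refine lpWalkA_eq_range polje f0 f1 i j k ?_ ?_ (polje.length + 1) 1 le_rfl (by omega)
    (by push_cast; omega)
  · intro x hx1 hx2
    exact ((hmem x).mp ((hLmem x).mp (hb x (by omega) hx2))).2
  · intro hB
    exact hc ((hLmem _).mpr ((hmem (k + 1)).mpr ⟨by omega, hB⟩))

-- ===== VERDICT (by name: the statement is the Claim_ definition above) =====
theorem lovska_poteza_spec : Claim_equal_lovska_poteza := by
  intro polje frog_position _ _
  unfold Spec_lovska_poteza lovska_poteza lovska_poteza_alt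
  set f0 := PySem.List.pyGetD frog_position 0 0
  set f1 := PySem.List.pyGetD frog_position 1 0
  have hmem := fun x => mem_lpFold polje f0 f1
    (PySem.Set.empty, PySem.Set.empty, PySem.Set.empty, PySem.Set.empty) x
  have hnl := lpFold_nodup_len polje f0 f1
    (PySem.Set.empty, PySem.Set.empty, PySem.Set.empty, PySem.Set.empty)
    List.nodup_nil List.nodup_nil List.nodup_nil List.nodup_nil
  simp only [List.foldl_cons, List.foldl_nil, List.nil_append, lpBuckets]
  rw [lpDir_eq polje f0 f1 1 1 _ (fun x => by
        have := (hmem x).1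
        simpa [PySem.Set.empty] using this)
      hnl.1.1 (by have := hnl.2.1; simpa [PySem.Set.empty] using this),
    lpDir_eq polje f0 f1 1 (-1) _ (fun x => by
        have := (hmem x).2.1
        simpa [PySem.Set.empty, sub_eq_add_neg] using this)
      hnl.1.2.1 (by have := hnl.2.2.1; simpa [PySem.Set.empty] using this),
    lpDir_eq polje f0 f1 (-1) 1 _ (fun x => by
        have := (hmem x).2.2.1
        simpa [PySem.Set.empty, sub_eq_add_neg] using this)
      hnl.1.2.2.1 (by have := hnl.2.2.2.1; simpa [PySem.Set.empty] using this),
    lpDir_eq polje f0 f1 (-1) (-1) _ (fun x => by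
        have := (hmem x).2.2.2
        simpa [PySem.Set.empty, sub_eq_add_neg] using this)
      hnl.1.2.2.2 (by have := hnl.2.2.2.2; simpa [PySem.Set.empty] using this)]
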